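-- pv_equiv track=rewrite | github.com/nickweseman/coderbyte | positions.py | SimpleSymbols
-- ===== SOURCE A (Python) =====
-- def SimpleSymbols(str):
--     str = str.lower()
--
--     for i in range(0, len(str)):
--         if ord('a') <= ord(str[i]) <= ord('z'):
--             if i == 0 or i == len(str)-1:
--                 return "false"
--             if str[i-1] != "+" or str[i+1] != "+":
--                 return "false"
--     return "true"
-- ===== SOURCE B (Python) =====
-- def SimpleSymbols(str):
--     parts = str.lower().split('+')
--     for j, p in enumerate(parts):
--         if any('a' <= c <= 'z' for c in p):
--             if len(p) != 1 or j == 0 or j == len(parts) - 1: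
--                 return "false"
--     return "true"
-- ===== Notes on version B (the rewrite author's own statement) =====
-- stated objective: alternative
-- what changed: Instead of checking each character's neighbours by index, B splits the lowered string at the plus-sign separator and judges whole segments: a segment containing a letter must be exactly one letter long and be neither the first nor the last segment.
import Mathlib
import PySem

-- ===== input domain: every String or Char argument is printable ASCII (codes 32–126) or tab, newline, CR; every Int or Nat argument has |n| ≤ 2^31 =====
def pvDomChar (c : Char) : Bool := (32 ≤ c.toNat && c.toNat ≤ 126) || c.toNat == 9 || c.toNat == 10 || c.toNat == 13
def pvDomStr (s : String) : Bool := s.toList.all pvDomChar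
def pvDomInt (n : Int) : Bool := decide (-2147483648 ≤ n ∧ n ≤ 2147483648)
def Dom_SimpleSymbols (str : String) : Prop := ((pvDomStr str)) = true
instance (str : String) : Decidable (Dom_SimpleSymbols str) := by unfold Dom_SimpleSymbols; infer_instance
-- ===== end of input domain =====

-- B replaces A's per-character neighbour checks by splitting the lowered string at the plus-sign
-- separator and judging whole segments (a letter-bearing segment must be a lone letter and interior).

-- ===== PORT A =====
-- A's index loop with early returns, as structural recursion on the index.
def SimpleSymbolsGo (cs : List Char) (i : Nat) : String :=
  if _h : i < cs.length then
    if 'a' ≤ cs.getD i ' ' ∧ cs.getD i ' ' ≤ 'z' then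
      if i = 0 ∨ i = cs.length - 1 then "false"
      else if cs.getD (i-1) ' ' ≠ '+' ∨ cs.getD (i+1) ' ' ≠ '+' then "false"
      else SimpleSymbolsGo cs (i+1)
    else SimpleSymbolsGo cs (i+1)
  else "true"
termination_by cs.length - i

def SimpleSymbols (str : String) : String :=
  SimpleSymbolsGo (PySem.Chars.lower str.toList) 0

-- ===== PORT B =====
-- hand port of Python str.split with the single-char separator '+' (exact: Python keeps empty pieces)
def pvSplitPlus : List Char → List (List Char)
  | [] => [[]]
  | c :: cs =>
    if c = '+' then [] :: pvSplitPlus cs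
    else match pvSplitPlus cs with
      | [] => [[c]]   -- unreachable: pvSplitPlus never returns []
      | p :: rest => (c :: p) :: rest

-- any('a' <= c <= 'z' for c in p)
def pvHasLetter (p : List Char) : Bool := p.any (fun c => 'a' ≤ c && c ≤ 'z')

-- Source B's enumerate loop over the parts, with early returns
def pvBGo (n : Nat) (j : Nat) : List (List Char) → String
  | [] => "true"
  | p :: rest =>
    if pvHasLetter p then
      if p.length ≠ 1 ∨ j = 0 ∨ j = n - 1 then "false" else pvBGo n (j+1) rest
    else pvBGo n (j+1) rest

def SimpleSymbols_alt (str : String) : String :=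
  let parts := pvSplitPlus (PySem.Chars.lower str.toList)
  pvBGo parts.length 0 parts

-- ===== PRECONDITION & SPEC =====
def Spec_SimpleSymbols (str : String) (out : String) : Prop := out = SimpleSymbols_alt str
instance (str : String) (out : String) : Decidable (Spec_SimpleSymbols str out) := by unfold Spec_SimpleSymbols; infer_instance

-- ===== CLAIM (what is proved, stated in full; the proofs are below) =====
def Claim_equal_SimpleSymbols : Prop := ∀ (str : String), Dom_SimpleSymbols str → Spec_SimpleSymbols str (SimpleSymbols str)

-- ===== LEMMAS AND PROOFS =====

-- A-side scan predicate: l = "previous char exists and is '+'"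
def pvL : Bool → List Char → Bool
  | _, [] => true
  | l, c :: cs => (!('a' ≤ c && c ≤ 'z') || (l && (cs.headD ' ' == '+'))) && pvL (c == '+') cs

-- B-side segment predicate: b = "this part is the first part"
def pvSegAll : Bool → List (List Char) → Bool
  | _, [] => true
  | b, p :: rest =>
    (!pvHasLetter p || (p.length == 1 && !b && !rest.isEmpty)) && pvSegAll false rest

theorem pvHeadD_drop (cs : List Char) (k : Nat) :
    (cs.drop k).headD ' ' = cs.getD k ' ' := by
  simp [List.headD_eq_head?_getD, List.head?_drop, List.getD_eq_getElem?_getD]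

theorem goL (cs : List Char) (i : Nat) :
    SimpleSymbolsGo cs i =
      (if pvL (decide (i ≠ 0) && (cs.getD (i-1) ' ' == '+')) (cs.drop i)
       then "true" else "false") := by
  by_cases h : i < cs.length
  · have hdrop : cs.drop i = cs[i] :: cs.drop (i+1) := (List.getElem_cons_drop h).symm
    have hget : cs.getD i ' ' = cs[i] := List.getD_eq_getElem cs ' ' h
    rw [SimpleSymbolsGo, dif_pos h, hdrop]
    rw [show pvL (decide (i ≠ 0) && (cs.getD (i-1) ' ' == '+')) (cs[i] :: cs.drop (i+1)) =
        ((!('a' ≤ cs[i] && cs[i] ≤ 'z') ||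
          ((decide (i ≠ 0) && (cs.getD (i-1) ' ' == '+')) && ((cs.drop (i+1)).headD ' ' == '+'))) &&
         pvL (cs[i] == '+') (cs.drop (i+1))) from rfl]
    rw [pvHeadD_drop]
    have hIH := goL cs (i+1)
    have hflag : (decide (i+1 ≠ 0) && (cs.getD (i+1-1) ' ' == '+')) = (cs[i] == '+') := by
      simp [List.getD_eq_getElem?_getD, List.getElem?_eq_getElem h]
    rw [hflag] at hIH
    by_cases hl : 'a' ≤ cs[i] ∧ cs[i] ≤ 'z'
    · rw [if_pos (by rw [hget]; exact hl)]
      have hlb : ('a' ≤ cs[i] && cs[i] ≤ 'z') = true := by simp [hl.1, hl.2]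
      by_cases h0 : i = 0
      · subst h0
        rw [if_pos (Or.inl rfl)]
        simp [hlb]
      · by_cases hlast : i = cs.length - 1
        · rw [if_pos (Or.inr hlast)]
          have hnil : cs.drop (i+1) = [] := List.drop_eq_nil_of_le (by omega)
          rw [hnil]
          have hnone : cs[i+1]? = none := List.getElem?_eq_none (by omega)
          simp [hlb, List.getD_eq_getElem?_getD, hnone]
        · rw [if_neg (by tauto)]
          have hfac : (!('a' ≤ cs[i] && cs[i] ≤ 'z') ||
              ((decide (i ≠ 0) && (cs.getD (i-1) ' ' == '+')) && (cs.getD (i+1) ' ' == '+'))) =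
              ((cs.getD (i-1) ' ' == '+') && (cs.getD (i+1) ' ' == '+')) := by
            simp [hlb, h0]
          rw [hfac]
          by_cases hc : cs.getD (i-1) ' ' ≠ '+' ∨ cs.getD (i+1) ' ' ≠ '+'
          · rw [if_pos hc]
            have hff : ((cs.getD (i-1) ' ' == '+') && (cs.getD (i+1) ' ' == '+')) = false := by
              rcases hc with h' | h'
              · rw [beq_eq_false_iff_ne.mpr h', Bool.false_and]
              · rw [beq_eq_false_iff_ne.mpr h', Bool.and_false]
            rw [hff]
            simp
          · rw [if_neg hc]
            push_neg at hc
            have htt : ((cs.getD (i-1) ' ' == '+') && (cs.getD (i+1) ' ' == '+')) = true := by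
              rw [beq_iff_eq.mpr hc.1, beq_iff_eq.mpr hc.2, Bool.and_true]
            rw [htt, Bool.true_and, hIH]
    · rw [if_neg (by rw [hget]; exact hl)]
      rw [hIH]
      have : ('a' ≤ cs[i] && cs[i] ≤ 'z') = false := by
        rcases not_and_or.mp hl with h' | h' <;> simp [h']
      simp [this]
  · rw [SimpleSymbolsGo, dif_neg h, List.drop_eq_nil_of_le (by omega)]
    simp [pvL]
termination_by cs.length - i
decreasing_by all_goals omega

theorem pvSplitPlus_ne_nil (cs : List Char) : pvSplitPlus cs ≠ [] := by
  cases cs with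
  | nil => simp [pvSplitPlus]
  | cons c cs =>
    simp only [pvSplitPlus]
    split
    · simp
    · split <;> simp

theorem bGoSeg (ps : List (List Char)) (j : Nat) :
    pvBGo (j + ps.length) j ps = (if pvSegAll (j == 0) ps then "true" else "false") := by
  induction ps generalizing j with
  | nil => simp [pvBGo, pvSegAll]
  | cons p rest ih =>
    have hn : j + (p :: rest).length = (j+1) + rest.length := by simp; omega
    have hIH := ih (j+1)
    rw [show ((j:Nat)+1 == 0) = false from by simp] at hIH
    rw [hn]
    show pvBGo ((j+1) + rest.length) j (p :: rest) = _
    rw [pvBGo]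
    rw [show pvSegAll (j == 0) (p :: rest) =
      ((!pvHasLetter p || (p.length == 1 && !(j == 0) && !rest.isEmpty)) && pvSegAll false rest) from rfl]
    have hlast : (j = (j+1) + rest.length - 1) ↔ rest = [] := by
      cases rest <;> simp <;> omega
    by_cases hp : pvHasLetter p = true
    · rw [if_pos hp]
      by_cases hbad : p.length ≠ 1 ∨ j = 0 ∨ j = (j+1) + rest.length - 1
      · rw [if_pos hbad]
        have : (p.length == 1 && !(j == 0) && !rest.isEmpty) = false := by
          rcases hbad with h' | h' | h'
          · simp [h']
          · simp [h']
          · rw [hlast] at h'; simp [h']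
        simp [hp, this]
      · rw [if_neg hbad, hIH]
        push_neg at hbad
        have hre : rest ≠ [] := fun hh => hbad.2.2 (hlast.mpr hh)
        have : (p.length == 1 && !(j == 0) && !rest.isEmpty) = true := by
          simp [hbad.1, hbad.2.1, hre]
        simp [this]
    · rw [if_neg hp, hIH]
      simp at hp
      simp [hp]

theorem mainLemma (cs : List Char) (l : Bool) :
    pvL l cs = pvSegAll (!l) (pvSplitPlus cs) := by
  induction cs generalizing l with
  | nil => simp [pvL, pvSplitPlus, pvSegAll, pvHasLetter]
  | cons c cs ih =>
    rw [show pvL l (c :: cs) =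
      ((!('a' ≤ c && c ≤ 'z') || (l && (cs.headD ' ' == '+'))) && pvL (c == '+') cs) from rfl]
    by_cases hc : c = '+'
    · subst hc
      rw [show pvSplitPlus ('+' :: cs) = [] :: pvSplitPlus cs from by simp [pvSplitPlus]]
      obtain ⟨p, rest, hps⟩ : ∃ p rest, pvSplitPlus cs = p :: rest := by
        cases h : pvSplitPlus cs with
        | nil => exact absurd h (pvSplitPlus_ne_nil cs)
        | cons p rest => exact ⟨p, rest, rfl⟩
      have hih : pvL ('+' == '+') cs = pvSegAll false (p :: rest) := by
        simp only [show ('+' == '+') = true from rfl, ih true, hps, Bool.not_true]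
      rw [hih, hps]
      simp [pvSegAll, pvHasLetter, show (decide ('a' ≤ '+') && decide ('+' ≤ 'z')) = false from by decide]
    · obtain ⟨p, rest, hps⟩ : ∃ p rest, pvSplitPlus cs = p :: rest := by
        cases h : pvSplitPlus cs with
        | nil => exact absurd h (pvSplitPlus_ne_nil cs)
        | cons p rest => exact ⟨p, rest, rfl⟩
      have hsp : pvSplitPlus (c :: cs) = (c :: p) :: rest := by
        simp only [pvSplitPlus, if_neg hc, hps]
      rw [hsp, ih (c == '+'), hps]
      rw [show (c == '+') = false from by simp [hc]]
      rw [show pvSegAll (!l) ((c :: p) :: rest) =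
        ((!pvHasLetter (c :: p) || ((c :: p).length == 1 && !(!l) && !rest.isEmpty)) && pvSegAll false rest) from rfl]
      rw [show pvSegAll (!false) (p :: rest) =
        ((!pvHasLetter p || (p.length == 1 && !(!false) && !rest.isEmpty)) && pvSegAll false rest) from rfl]
      have hHL : pvHasLetter (c :: p) = (('a' ≤ c && c ≤ 'z') || pvHasLetter p) := by
        simp [pvHasLetter]
      by_cases hletter : ('a' ≤ c && c ≤ 'z') = true
      · -- c is a letter: the head part carries a letter
        rw [hHL, hletter]
        -- relate cs.headD and the shape of (p, rest)
        cases cs with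
        | nil =>
          have : p = [] ∧ rest = [] := by
            have := hps; simp [pvSplitPlus] at this; exact ⟨this.1, this.2⟩
          obtain ⟨hp0, hr0⟩ := this
          subst hp0; subst hr0
          simp [hletter, pvSegAll, pvHasLetter]
        | cons d cs' =>
          by_cases hd : d = '+'
          · subst hd
            have hps' : pvSplitPlus ('+' :: cs') = [] :: pvSplitPlus cs' := by simp [pvSplitPlus]
            rw [hps'] at hps
            have hp0 : p = [] := (List.cons.injEq _ _ _ _ ▸ hps).1.symm
            have hr : rest = pvSplitPlus cs' := ((List.cons.injEq _ _ _ _).mp hps).2.symm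
            have hre : rest ≠ [] := by rw [hr]; exact pvSplitPlus_ne_nil cs'
            subst hp0
            have hre' : rest.isEmpty = false := by simp [hre]
            simp [hletter, hre', pvHasLetter]
          · obtain ⟨q, qs, hq⟩ : ∃ q qs, pvSplitPlus cs' = q :: qs := by
              cases h : pvSplitPlus cs' with
              | nil => exact absurd h (pvSplitPlus_ne_nil cs')
              | cons q qs => exact ⟨q, qs, rfl⟩
            have hps' : pvSplitPlus (d :: cs') = (d :: q) :: qs := by
              simp only [pvSplitPlus, if_neg hd, hq]
            rw [hps'] at hps
            have hp : p = d :: q := ((List.cons.injEq _ _ _ _).mp hps).1.symm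
            subst hp
            have : (((d : Char) :: cs').headD ' ' == '+') = false := by simp [hd]
            simp [hletter, this]
            exact fun _ h' _ => absurd h' hd
      · -- c is not a letter
        have hlf : ('a' ≤ c && c ≤ 'z') = false := by
          cases h : ('a' ≤ c && c ≤ 'z') <;> simp_all
        rw [hHL, hlf]
        by_cases hp : pvHasLetter p = true
        · have hpne : p ≠ [] := by
            intro h; rw [h] at hp; simp [pvHasLetter] at hp
          simp [hp, hlf]
          exact fun h _ _ => absurd h hpne
        · have hpf : pvHasLetter p = false := by cases h : pvHasLetter p <;> simp_all
          simp [hpf, hlf]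

-- ===== VERDICT (by name: the statement is the Claim_ definition above) =====
theorem SimpleSymbols_spec : Claim_equal_SimpleSymbols := by
  intro str _
  unfold Spec_SimpleSymbols SimpleSymbols SimpleSymbols_alt
  rw [goL]
  have hB := bGoSeg (pvSplitPlus (PySem.Chars.lower str.toList)) 0
  simp only [Nat.zero_add] at hB
  rw [hB]
  rw [show (decide ((0:Nat) ≠ 0) && ((PySem.Chars.lower str.toList).getD (0-1) ' ' == '+')) = false from by simp]
  rw [List.drop_zero, mainLemma]
  rfl
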